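-- pv_equiv track=rewrite | github.com/mohammadgorji/little-python-projects | PIC/PIC.py | lowestPriority
-- ===== SOURCE A (Python) =====
-- def isOperator(char):
--     return char in "+-*/"
--
-- def priority(char):
--     if char in "+-":
--         return 1
--     else:
--         return 2
--
-- def lowestPriority(expression):
--     lowest = 2
--     countCondition = True
--
--     for char in expression:
--         if countCondition and isOperator(char):
--             opPriority = priority(char)
--
--             if opPriority < lowest:
--                 lowest = opPriority
--         elif char == '(':
--             countCondition = False
--         elif char == ')':
--             countCondition = True
--
--     return lowest
-- ===== SOURCE B (Python) =====
-- def lowestPriority(expression):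
--     outside = []
--     inside = False
--     for char in expression:
--         if char == '(':
--             inside = True
--         elif char == ')':
--             inside = False
--         elif not inside:
--             outside.append(char)
--     return 1 if any(c in '+-' for c in outside) else 2
-- ===== Notes on version B (the rewrite author's own statement) =====
-- stated objective: simpler
-- what changed: Replaces the running-minimum priority update with a two-phase shape: first collect the characters outside parentheses (same single boolean-flag semantics), then answer by testing whether any additive (priority-1) operator was collected.
import Mathlib
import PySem

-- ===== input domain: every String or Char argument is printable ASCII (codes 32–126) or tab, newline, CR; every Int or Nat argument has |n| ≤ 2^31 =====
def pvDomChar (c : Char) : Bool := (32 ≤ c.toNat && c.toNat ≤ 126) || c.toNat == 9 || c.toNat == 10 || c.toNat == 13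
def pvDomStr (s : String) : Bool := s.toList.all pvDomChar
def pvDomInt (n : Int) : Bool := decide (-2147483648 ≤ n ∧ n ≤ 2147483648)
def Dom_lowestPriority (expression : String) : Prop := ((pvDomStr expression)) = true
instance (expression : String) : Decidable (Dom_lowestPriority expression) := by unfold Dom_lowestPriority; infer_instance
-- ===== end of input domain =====

-- B replaces A's running-minimum update with a build-then-test two-phase shape (objective: simpler).

-- ===== PORT A =====
def isOperator (char : Char) : Bool := (['+', '-', '*', '/'] : List Char).contains char

def priority (char : Char) : Int := if (['+', '-'] : List Char).contains char then 1 else 2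

def lpStepA (s : Int × Bool) (char : Char) : Int × Bool :=
  if s.2 && isOperator char then
    let opPriority := priority char
    (if opPriority < s.1 then opPriority else s.1, s.2)
  else if char = '(' then (s.1, false)
  else if char = ')' then (s.1, true)
  else s

def lowestPriority (expression : String) : Int :=
  (expression.toList.foldl lpStepA (2, true)).1

-- ===== PORT B =====
def collectOutside (inside : Bool) : List Char → List Char
  | [] => []
  | c :: cs =>
    if c = '(' then collectOutside true cs
    else if c = ')' then collectOutside false cs
    else if !inside then c :: collectOutside inside cs
    else collectOutside inside cs

def lowestPriority_alt (expression : String) : Int :=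
  if (collectOutside false expression.toList).any (fun c => c = '+' || c = '-') then 1 else 2

-- ===== PRECONDITION & SPEC =====
def Spec_lowestPriority (expression : String) (out : Int) : Prop := out = lowestPriority_alt expression
instance (expression : String) (out : Int) : Decidable (Spec_lowestPriority expression out) := by unfold Spec_lowestPriority; infer_instance

-- ===== CLAIM (what is proved, stated in full; the proofs are below) =====
def Claim_equal_lowestPriority : Prop := ∀ (expression : String), Dom_lowestPriority expression → Spec_lowestPriority expression (lowestPriority expression)

-- ===== LEMMAS AND PROOFS =====

theorem lp_inv (cs : List Char) (cc : Bool) (l : Int) (hl : l = 1 ∨ l = 2) :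
    (List.foldl lpStepA (l, cc) cs).1 =
      if l = 1 then 1
      else if (collectOutside (!cc) cs).any (fun c => c = '+' || c = '-') then 1 else 2 := by
  induction cs generalizing cc l with
  | nil => rcases hl with h | h <;> simp [h, collectOutside]
  | cons c cs ih =>
    by_cases hpm : c = '+' ∨ c = '-'
    · have hop : isOperator c = true := by rcases hpm with h | h <;> simp [h, isOperator]
      have hpr : priority c = 1 := by rcases hpm with h | h <;> simp [h, priority]
      have hpar : ¬ c = '(' ∧ ¬ c = ')' := by rcases hpm with h | h <;> simp [h]
      cases cc with
      | true =>
        have hstep : lpStepA (l, true) c = (1, true) := by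
          rcases hl with h | h <;> simp [lpStepA, hop, hpr, h]
        rw [List.foldl_cons, hstep, ih _ _ (Or.inl rfl)]
        rcases hl with h | h
        · simp [h]
        · have : l ≠ 1 := by omega
          simp only [this, if_false, Bool.not_false, collectOutside, hpar.1, hpar.2,
            Bool.not_true]
          rcases hpm with hc | hc <;> simp [hc]
      | false =>
        have hstep : lpStepA (l, false) c = (l, false) := by
          simp [lpStepA, hpar.1, hpar.2]
        rw [List.foldl_cons, hstep, ih _ _ hl]
        simp [collectOutside, hpar.1, hpar.2]
    · rw [not_or] at hpm
      by_cases h1 : c = '('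
      · have hstep : lpStepA (l, cc) c = (l, false) := by
          simp [lpStepA, isOperator, h1]
        rw [List.foldl_cons, hstep, ih _ _ hl]
        simp [collectOutside, h1]
      · by_cases h2 : c = ')'
        · have hstep : lpStepA (l, cc) c = (l, true) := by
            simp [lpStepA, isOperator, h2]
          rw [List.foldl_cons, hstep, ih _ _ hl]
          simp [collectOutside, h2]
        · have hstep : lpStepA (l, cc) c = (l, cc) := by
            by_cases hop : isOperator c = true
            · have hpr : priority c = 2 := by simp [priority, hpm.1, hpm.2]
              have hlt : ¬ ((2 : Int) < l) := by rcases hl with h | h <;> omega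
              cases cc <;> simp [lpStepA, hop, hpr, hlt, h1, h2]
            · simp [lpStepA, hop, h1, h2]
          rw [List.foldl_cons, hstep, ih _ _ hl]
          cases cc <;> simp [collectOutside, h1, h2, hpm.1, hpm.2]

-- ===== VERDICT (by name: the statement is the Claim_ definition above) =====
theorem lowestPriority_spec : Claim_equal_lowestPriority := by
  intro e _
  unfold Spec_lowestPriority lowestPriority lowestPriority_alt
  rw [lp_inv _ _ _ (Or.inr rfl)]
  simp
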